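-- pv_equiv track=rewrite | github.com/vidyaai/vidya_ai_backend | src/utils/smart_image_handler.py | _add_selective_image_markers
-- ===== SOURCE A (Python) =====
-- def _add_selective_image_markers(text: str, max_images: int) -> str:
--     """Add markers only for important images (near headers, formulas)"""
--     lines = text.split('\n')
--     result = []
--     image_count = 0
--     last_header = "concept"
--
--     for i, line in enumerate(lines):
--         # Track headers
--         if line.startswith('##'):
--             last_header = line.replace('#', '').strip()
--
--         # Only enhance first N images or images near headers
--         if '<!-- image -->' in line:
--             image_count += 1
--
--             # Check if near header (within 3 lines)
--             near_header = any(
--                 lines[j].startswith('##')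
--                 for j in range(max(0, i-3), min(len(lines), i+3))
--             )
--
--             if image_count <= max_images or near_header:
--                 enhanced = f'[DIAGRAM illustrating {last_header} - see lecture notes]'
--                 result.append(line.replace('<!-- image -->', enhanced))
--             else:
--                 # Skip less important images
--                 result.append('[Additional supporting diagram available in lecture notes]')
--         else:
--             result.append(line)
--
--     return '\n'.join(result)
-- ===== SOURCE B (Python) =====
-- def _add_selective_image_markers(text: str, max_images: int) -> str:
--     """Two-pass version: precompute a boolean 'near header' array, then one linear pass."""
--     lines = text.split('\n')
--     n = len(lines)
--     near = [False] * n
--     for h, line in enumerate(lines):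
--         if line.startswith('##'):
--             for j in range(max(0, h - 2), min(n, h + 4)):
--                 near[j] = True
--
--     result = []
--     image_count = 0
--     last_header = "concept"
--     for i, line in enumerate(lines):
--         if line.startswith('##'):
--             last_header = line.replace('#', '').strip()
--         if '<!-- image -->' in line:
--             image_count += 1
--             if image_count <= max_images or near[i]:
--                 result.append(line.replace('<!-- image -->',
--                     f'[DIAGRAM illustrating {last_header} - see lecture notes]'))
--             else:
--                 result.append('[Additional supporting diagram available in lecture notes]')
--         else:
--             result.append(line)
--     return '\n'.join(result)
-- ===== Notes on version B (the rewrite author's own statement) =====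
-- stated objective: alternative
-- what changed: B replaces A's per-image inner window scan over lines with a precomputed boolean near-header array built in a first pass by inverting the window (marking lines h-2..h+3 around each header), then a single linear pass using near[i].
import Mathlib
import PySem

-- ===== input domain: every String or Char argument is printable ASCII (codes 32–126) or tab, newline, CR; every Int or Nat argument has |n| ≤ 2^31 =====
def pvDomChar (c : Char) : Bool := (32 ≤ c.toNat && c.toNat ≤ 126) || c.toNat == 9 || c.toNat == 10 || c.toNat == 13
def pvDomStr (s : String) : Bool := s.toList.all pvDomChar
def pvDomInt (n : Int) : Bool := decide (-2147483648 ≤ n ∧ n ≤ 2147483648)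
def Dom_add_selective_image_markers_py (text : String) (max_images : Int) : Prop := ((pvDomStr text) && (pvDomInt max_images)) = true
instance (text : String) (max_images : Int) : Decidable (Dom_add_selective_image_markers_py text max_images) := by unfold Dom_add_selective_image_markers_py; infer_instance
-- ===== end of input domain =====

-- B replaces A's per-image inner window scan with a first pass that marks a boolean
-- near-header array (inverting the ±window around each header), then one linear pass.

-- ===== PORT A =====
def add_selective_image_markers_py (text : String) (max_images : Int) : String :=
  let lines := (PySem.Str.split? text "\n").getD []
  let st := (PySem.List.enumerate lines 0).foldl
    (fun (st : List String × Int × String) p =>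
      let i := p.1
      let line := p.2
      let last_header :=
        if PySem.Str.startswith line "##" then
          PySem.Str.strip (PySem.Str.replace line "#" "")
        else st.2.2
      if PySem.Str.isIn "<!-- image -->" line then
        let image_count := st.2.1 + 1
        let near_header :=
          (PySem.List.pyRange (max 0 (i - 3)) (min (lines.length : Int) (i + 3)) 1).any
            (fun j => PySem.Str.startswith (PySem.List.pyGetD lines j "") "##")
        if decide (image_count ≤ max_images) || near_header then
          (st.1 ++ [PySem.Str.replace line "<!-- image -->"
              ("[DIAGRAM illustrating " ++ last_header ++ " - see lecture notes]")],
           image_count, last_header)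
        else
          (st.1 ++ ["[Additional supporting diagram available in lecture notes]"],
           image_count, last_header)
      else
        (st.1 ++ [line], st.2.1, last_header))
    ([], 0, "concept")
  PySem.Str.join "\n" st.1

-- ===== PORT B =====
-- near[j] = True for j in range(max(0,h-2), min(n,h+4)); all indices are ≥ 0 so .toNat is exact
def pvMarkRange (arr : List Bool) (a b : Int) : List Bool :=
  (PySem.List.pyRange a b 1).foldl (fun arr j => arr.set j.toNat true) arr

def add_selective_image_markers_py_alt (text : String) (max_images : Int) : String :=
  let lines := (PySem.Str.split? text "\n").getD []
  let n := (lines.length : Int)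
  let near := (PySem.List.enumerate lines 0).foldl
    (fun arr (p : Int × String) =>
      if PySem.Str.startswith p.2 "##" then
        pvMarkRange arr (max 0 (p.1 - 2)) (min n (p.1 + 4))
      else arr)
    (List.replicate lines.length false)
  let st := (PySem.List.enumerate lines 0).foldl
    (fun (st : List String × Int × String) p =>
      let i := p.1
      let line := p.2
      let last_header :=
        if PySem.Str.startswith line "##" then
          PySem.Str.strip (PySem.Str.replace line "#" "")
        else st.2.2
      if PySem.Str.isIn "<!-- image -->" line then
        let image_count := st.2.1 + 1
        if decide (image_count ≤ max_images) || near.getD i.toNat false then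
          (st.1 ++ [PySem.Str.replace line "<!-- image -->"
              ("[DIAGRAM illustrating " ++ last_header ++ " - see lecture notes]")],
           image_count, last_header)
        else
          (st.1 ++ ["[Additional supporting diagram available in lecture notes]"],
           image_count, last_header)
      else
        (st.1 ++ [line], st.2.1, last_header))
    ([], 0, "concept")
  PySem.Str.join "\n" st.1

-- ===== PRECONDITION & SPEC =====
def Spec_add_selective_image_markers_py (text : String) (max_images : Int) (out : String) : Prop := out = add_selective_image_markers_py_alt text max_images
instance (text : String) (max_images : Int) (out : String) : Decidable (Spec_add_selective_image_markers_py text max_images out) := by unfold Spec_add_selective_image_markers_py; infer_instance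

-- ===== CLAIM (what is proved, stated in full; the proofs are below) =====
def Claim_equal_add_selective_image_markers_py : Prop := ∀ (text : String) (max_images : Int), Dom_add_selective_image_markers_py text max_images → Spec_add_selective_image_markers_py text max_images (add_selective_image_markers_py text max_images)

-- ===== LEMMAS AND PROOFS =====

theorem pvMarkRange_length (arr : List Bool) (a b : Int) :
    (pvMarkRange arr a b).length = arr.length := by
  unfold pvMarkRange
  induction PySem.List.pyRange a b 1 generalizing arr with
  | nil => rfl
  | cons x t ih => simpa [List.foldl_cons] using ih (arr.set x.toNat true)

theorem pvMarkRange_getD (arr : List Bool) (a b : Int) (ha : 0 ≤ a) (i : Nat)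
    (hi : i < arr.length) :
    (pvMarkRange arr a b).getD i false
      = (decide (a ≤ (i : Int) ∧ (i : Int) < b) || arr.getD i false) := by
  unfold pvMarkRange
  by_cases hab : a < b
  · rw [PySem.List.pyRange_one_cons hab, List.foldl_cons]
    have hrec := pvMarkRange_getD (arr.set a.toNat true) (a + 1) b (by omega) i
      (by simpa using hi)
    rw [pvMarkRange] at hrec
    rw [hrec]
    have hget : (arr.set a.toNat true).getD i false
        = if a.toNat = i then true else arr.getD i false := by
      by_cases h : a.toNat = i
      · rw [if_pos h, ← h]
        simp [List.getD_eq_getElem?_getD, h ▸ hi]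
      · rw [if_neg h]
        simp [List.getD_eq_getElem?_getD, List.getElem?_set_ne h]
    rw [hget]
    by_cases h : a.toNat = i
    · rw [if_pos h]
      have h1 : (a ≤ (i : Int) ∧ (i : Int) < b) := by omega
      simp [h1]
    · rw [if_neg h]
      congr 1
      simp only [decide_eq_decide]
      omega
  · rw [PySem.List.pyRange_one_eq_nil (by omega), List.foldl_nil]
    have : ¬ (a ≤ (i : Int) ∧ (i : Int) < b) := by omega
    simp [this]
termination_by (b - a).toNat
decreasing_by omega

-- the built near-array read at a valid index i is the existence of a header line within the window
theorem pvNear_getD (lines : List String) (ps : List (Int × String)) (arr : List Bool)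
    (harr : arr.length = lines.length) (i : Nat) (hi : i < lines.length) :
    ((ps.foldl (fun arr (p : Int × String) =>
        if PySem.Str.startswith p.2 "##" then
          pvMarkRange arr (max 0 (p.1 - 2)) (min (lines.length : Int) (p.1 + 4))
        else arr) arr).getD i false)
      = (ps.any (fun p => PySem.Str.startswith p.2 "##"
            && decide (p.1 - 2 ≤ (i : Int) ∧ (i : Int) < p.1 + 4))
         || arr.getD i false) := by
  induction ps generalizing arr with
  | nil => simp
  | cons p t ih =>
    rw [List.foldl_cons]
    by_cases hp : PySem.Str.startswith p.2 "##"
    · rw [if_pos hp]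
      rw [ih _ (by rw [pvMarkRange_length]; exact harr)]
      rw [pvMarkRange_getD _ _ _ (by omega) i (by omega)]
      rw [List.any_cons, hp]
      have : (decide (max 0 (p.1 - 2) ≤ (i : Int) ∧ (i : Int) < min (lines.length : Int) (p.1 + 4)))
          = (decide (p.1 - 2 ≤ (i : Int) ∧ (i : Int) < p.1 + 4)) := by
        simp only [decide_eq_decide]
        omega
      rw [this]
      cases decide (p.1 - 2 ≤ (i : Int) ∧ (i : Int) < p.1 + 4) <;>
        cases t.any (fun p => PySem.Str.startswith p.2 "##"
            && decide (p.1 - 2 ≤ (i : Int) ∧ (i : Int) < p.1 + 4)) <;>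
        cases arr.getD i false <;> simp

    · rw [Bool.not_eq_true] at hp
      rw [if_neg (by rw [hp]; simp), ih _ harr, List.any_cons, hp]
      simp

-- A's inner window scan equals B's precomputed near-array entry
theorem pvWindow_eq_near (lines : List String) (k : Nat) (hk : k < lines.length) :
    ((PySem.List.pyRange (max 0 ((k : Int) - 3)) (min (lines.length : Int) ((k : Int) + 3)) 1).any
        (fun j => PySem.Str.startswith (PySem.List.pyGetD lines j "") "##"))
      = (((PySem.List.enumerate lines 0).foldl (fun arr (p : Int × String) =>
            if PySem.Str.startswith p.2 "##" then
              pvMarkRange arr (max 0 (p.1 - 2)) (min (lines.length : Int) (p.1 + 4))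
            else arr) (List.replicate lines.length false)).getD k false) := by
  rw [pvNear_getD lines _ _ (by simp) k hk]
  simp only [List.getD_eq_getElem?_getD, List.getElem?_replicate]
  rw [Bool.eq_iff_iff]
  simp only [List.any_eq_true, Bool.or_eq_true, Bool.and_eq_true, decide_eq_true_eq,
    PySem.List.mem_pyRange_one]
  constructor
  · rintro ⟨j, ⟨hj1, hj2⟩, hj3⟩
    rw [PySem.List.pyGetD_eq_getElem lines "" (by omega) (by omega)] at hj3
    left
    refine ⟨(j, lines[j.toNat]), ?_, hj3, by omega⟩
    rw [PySem.List.mem_enumerate_iff]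
    exact ⟨j.toNat, by omega, by simp; omega⟩
  · rintro (⟨q, hq, hst, hr⟩ | h)
    · rw [PySem.List.mem_enumerate_iff] at hq
      obtain ⟨m, hm, rfl⟩ := hq
      simp only [zero_add] at hst hr ⊢
      refine ⟨(m : Int), ⟨by omega, by omega⟩, ?_⟩
      rw [PySem.List.pyGetD_eq_getElem lines "" (by omega) (by omega)]
      simpa using hst
    · simp [hk] at h

-- ===== VERDICT (by name: the statement is the Claim_ definition above) =====
theorem add_selective_image_markers_py_spec : Claim_equal_add_selective_image_markers_py := by
  intro text max_images _
  unfold Spec_add_selective_image_markers_py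
  simp only [add_selective_image_markers_py, add_selective_image_markers_py_alt]
  refine congrArg (fun l => PySem.Str.join "\n" l) (congrArg Prod.fst ?_)
  apply PySem.List.foldl_congr_mem
  intro acc p hp
  rw [PySem.List.mem_enumerate_iff] at hp
  obtain ⟨k, hk, rfl⟩ := hp
  simp only [zero_add]
  rw [pvWindow_eq_near _ k hk]
  simp
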